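-- pv_equiv track=rewrite | github.com/pypi-data/pypi-mirror-332 | packages/gkfutils/gkfutils-1.1.9-py3-none-any.whl/gkfutils/utils.py | second_majority_element
-- ===== SOURCE A (Python) =====
-- def majority_element(arr):
--     if arr == []:
--         return None
--     else:
--         dict_ = {}
--         for key in arr:
--             dict_[key] = dict_.get(key, 0) + 1
--         maybe_maj_element = max(dict_, key=lambda k: dict_[k])
--         maybe_maj_key = [k for k, v in dict_.items() if v == dict_[maybe_maj_element]]
--
--         if len(maybe_maj_key) == 1:
--             maj_element = maybe_maj_element
--             return maj_element
--         else:
--             return None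
--
-- def second_majority_element(arr, remove_first_mj):
--     for i in range(len(arr)):
--         if remove_first_mj in arr:
--             arr.remove(remove_first_mj)
--     if arr != []:
--         second_mj = majority_element(arr)
--         return second_mj
--     else:
--         return None
-- ===== SOURCE B (Python) =====
-- def second_majority_element(arr, remove_first_mj):
--     arr[:] = [x for x in arr if x != remove_first_mj]
--     if not arr:
--         return None
--     s = sorted(arr)
--     best_val, best_len, ties = None, 0, 0
--     i, n = 0, len(s)
--     while i < n:
--         j = i + 1
--         while j < n and s[j] == s[i]:
--             j += 1
--         run = j - i
--         if run > best_len: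
--             best_val, best_len, ties = s[i], run, 1
--         elif run == best_len:
--             ties += 1
--         i = j
--     return best_val if ties == 1 else None
-- ===== Notes on version B (the rewrite author's own statement) =====
-- stated objective: faster
-- what changed: Replaces A's repeated in-place list.remove loop and frequency-dict-plus-max mode finder by a single filter followed by sorting a copy and scanning consecutive equal runs, tracking the longest run and how many runs attain it.
import Mathlib
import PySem

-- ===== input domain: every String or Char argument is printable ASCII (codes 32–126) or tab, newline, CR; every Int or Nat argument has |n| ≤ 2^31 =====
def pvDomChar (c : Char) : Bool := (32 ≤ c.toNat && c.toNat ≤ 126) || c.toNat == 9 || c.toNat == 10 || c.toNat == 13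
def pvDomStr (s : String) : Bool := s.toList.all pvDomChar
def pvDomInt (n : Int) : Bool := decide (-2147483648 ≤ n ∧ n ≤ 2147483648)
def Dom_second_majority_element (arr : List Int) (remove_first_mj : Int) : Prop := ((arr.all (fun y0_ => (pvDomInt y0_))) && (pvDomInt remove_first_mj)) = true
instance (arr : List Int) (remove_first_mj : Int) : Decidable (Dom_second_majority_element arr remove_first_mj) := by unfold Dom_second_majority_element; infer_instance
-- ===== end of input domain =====

-- B replaces A's repeated in-place remove loop and dict-based mode finder by one filter plus a
-- sort-and-scan over equal runs (alternative algorithm; return value proved equal; both versions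
-- also mutate the caller's list in the same way, removing every occurrence of remove_first_mj).


-- ===== PORT A =====
def majority_element (arr : List Int) : Option Int :=
  if arr = [] then none
  else
    let dict_ : PySem.Dict Int Int :=
      arr.foldl (fun d key => d.insert key (d.getD key 0 + 1)) PySem.Dict.empty
    match PySem.List.max? dict_.keys (fun k => dict_.getD k 0) with
    | none => none   -- unreachable: arr ≠ [] so the dict has keys
    | some maybe_maj_element =>
      let maybe_maj_key :=
        (dict_.items.filter (fun kv => kv.2 == dict_.getD maybe_maj_element 0)).map (fun kv => kv.1)
      if maybe_maj_key.length = 1 then some maybe_maj_element else none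

def second_majority_element (arr : List Int) (remove_first_mj : Int) : Option Int :=
  let arr1 :=
    (PySem.List.pyRange 0 arr.length 1).foldl
      (fun a _ =>
        if remove_first_mj ∈ a then
          match PySem.List.remove? a remove_first_mj with
          | some a' => a'
          | none => a
        else a) arr
  if arr1 ≠ [] then majority_element arr1 else none

-- ===== PORT B =====
-- the run scan: walk the sorted list, each step consumes one maximal run of equal values
def altScan : List Int → Option Int → Int → Int → Option Int
  | [], best_val, _, ties => if ties = 1 then best_val else none
  | v :: t, best_val, best_len, ties =>
    let run : Int := 1 + ((t.takeWhile (fun x => x == v)).length : Int)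
    let rest := t.dropWhile (fun x => x == v)
    if best_len < run then altScan rest (some v) run 1
    else if run = best_len then altScan rest best_val best_len (ties + 1)
    else altScan rest best_val best_len ties
termination_by l => l.length
decreasing_by
  all_goals exact Nat.lt_succ_of_le (List.length_dropWhile_le _ _)

def second_majority_element_alt (arr : List Int) (remove_first_mj : Int) : Option Int :=
  let rest := arr.filter (fun x => !(x == remove_first_mj))
  if rest = [] then none
  else altScan (PySem.List.sorted rest (fun x => x) false) none 0 0

-- ===== PRECONDITION & SPEC =====
def Spec_second_majority_element (arr : List Int) (remove_first_mj : Int) (out : Option Int) : Prop := out = second_majority_element_alt arr remove_first_mj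
instance (arr : List Int) (remove_first_mj : Int) (out : Option Int) : Decidable (Spec_second_majority_element arr remove_first_mj out) := by unfold Spec_second_majority_element; infer_instance

-- ===== CLAIM (what is proved, stated in full; the proofs are below) =====
def Claim_equal_second_majority_element : Prop := ∀ (arr : List Int) (remove_first_mj : Int), Dom_second_majority_element arr remove_first_mj → Spec_second_majority_element arr remove_first_mj (second_majority_element arr remove_first_mj)

-- ===== LEMMAS AND PROOFS =====

-- the run decomposition of a list, as (value, run length) pairs
def runPairs : List Int → List (Int × Int)
  | [] => []
  | v :: t =>
    (v, 1 + ((t.takeWhile (fun x => x == v)).length : Int)) :: runPairs (t.dropWhile (fun x => x == v))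
termination_by l => l.length
decreasing_by
  all_goals exact Nat.lt_succ_of_le (List.length_dropWhile_le _ _)

-- the scan of altScan, lifted to run pairs
def scanPairs : List (Int × Int) → Option Int → Int → Int → Option Int
  | [], best_val, _, ties => if ties = 1 then best_val else none
  | (v, run) :: rest, best_val, best_len, ties =>
    if best_len < run then scanPairs rest (some v) run 1
    else if run = best_len then scanPairs rest best_val best_len (ties + 1)
    else scanPairs rest best_val best_len ties

def maxSnd (ps : List (Int × Int)) : Int := ps.foldr (fun p m => max p.2 m) 0

def winners (ps : List (Int × Int)) : List (Int × Int) := ps.filter (fun p => p.2 = maxSnd ps)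

-- the common abstraction: the value of the unique pair with maximal second component, or none
def uniqueMax (ps : List (Int × Int)) : Option Int :=
  match winners ps with
  | [p] => some p.1
  | _ => none

lemma maxSnd_nonneg (ps : List (Int × Int)) : 0 ≤ maxSnd ps := by
  induction ps with
  | nil => simp [maxSnd]
  | cons p t ih => simp only [maxSnd, List.foldr_cons] at *; exact le_max_of_le_right ih

lemma maxSnd_ge {ps : List (Int × Int)} {p : Int × Int} (h : p ∈ ps) : p.2 ≤ maxSnd ps := by
  induction ps with
  | nil => simp at h
  | cons q t ih =>
    simp only [maxSnd, List.foldr_cons] at *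
    rcases List.mem_cons.1 h with h | h
    · subst h; exact le_max_left _ _
    · exact le_max_of_le_right (ih h)

lemma maxSnd_le {ps : List (Int × Int)} {c : Int} (hc : 0 ≤ c) (h : ∀ p ∈ ps, p.2 ≤ c) :
    maxSnd ps ≤ c := by
  induction ps with
  | nil => simpa [maxSnd] using hc
  | cons q t ih =>
    simp only [maxSnd, List.foldr_cons] at *
    exact max_le (h q (List.mem_cons_self ..)) (ih (fun p hp => h p (List.mem_cons_of_mem _ hp)))

lemma maxSnd_append (l1 l2 : List (Int × Int)) :
    maxSnd (l1 ++ l2) = max (maxSnd l1) (maxSnd l2) := by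
  induction l1 with
  | nil =>
    show maxSnd l2 = max (maxSnd []) (maxSnd l2)
    rw [show maxSnd [] = 0 from rfl, max_eq_right (maxSnd_nonneg l2)]
  | cons q t ih => simp only [maxSnd, List.foldr_cons, List.cons_append] at *; rw [ih, max_assoc]

lemma maxSnd_attained {ps : List (Int × Int)} (hne : ps ≠ [])
    (hpos : ∀ p ∈ ps, 1 ≤ p.2) : ∃ p ∈ ps, p.2 = maxSnd ps := by
  induction ps with
  | nil => simp at hne
  | cons q t ih =>
    by_cases ht : t = []
    · subst ht
      refine ⟨q, List.mem_cons_self .., ?_⟩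
      have h1 := hpos q (List.mem_cons_self ..)
      simp only [maxSnd, List.foldr_cons, List.foldr_nil]
      omega
    · rcases ih ht (fun p hp => hpos p (List.mem_cons_of_mem _ hp)) with ⟨p, hp, hmax⟩
      by_cases hle : q.2 ≤ maxSnd t
      · exact ⟨p, List.mem_cons_of_mem _ hp, by
          show p.2 = max q.2 (maxSnd t)
          rw [max_eq_right hle]; exact hmax⟩
      · exact ⟨q, List.mem_cons_self .., by
          show q.2 = max q.2 (maxSnd t)
          rw [max_eq_left (le_of_not_ge hle)]⟩

-- the remove loop: iterating "remove first occurrence" length-many times is filtering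
lemma filter_ne_erase (xs : List Int) (r : Int) :
    (xs.erase r).filter (fun x => !(x == r)) = xs.filter (fun x => !(x == r)) := by
  induction xs with
  | nil => rfl
  | cons x t ih =>
    by_cases hx : x = r
    · subst hx; simp [List.erase_cons_head]
    · rw [List.erase_cons_tail (by simpa using hx)]
      simp only [List.filter_cons, ih]

lemma iterate_remove (n : ℕ) (xs : List Int) (r : Int) (h : xs.count r ≤ n) :
    (fun a : List Int =>
      if r ∈ a then
        match PySem.List.remove? a r with
        | some a' => a'
        | none => a
      else a)^[n] xs = xs.filter (fun x => !(x == r)) := by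
  induction n generalizing xs with
  | zero =>
    have hr : r ∉ xs := by
      intro hmem
      have := List.count_pos_iff.2 hmem
      omega
    simp only [Function.iterate_zero, id_eq]
    exact (List.filter_eq_self.2 (fun x hx => by
      simp only [Bool.not_eq_eq_eq_not, Bool.not_true, beq_eq_false_iff_ne]
      exact fun he => hr (he ▸ hx))).symm
  | succ n ih =>
    rw [Function.iterate_succ_apply]
    by_cases hmem : r ∈ xs
    · simp only [if_pos hmem, PySem.List.remove?_eq_some_erase xs r hmem]
      rw [ih (xs.erase r) ?_, filter_ne_erase]
      have : List.count r (xs.erase r) = List.count r xs - 1 := List.count_erase_self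
      omega
    · simp only [hmem, if_neg, not_false_iff]
      have hc : xs.count r = 0 := List.count_eq_zero.2 hmem
      exact ih xs (by omega)

lemma foldl_ignore {α β : Type} (l : List β) (f : α → α) (s : α) :
    l.foldl (fun a _ => f a) s = f^[l.length] s := by
  induction l generalizing s with
  | nil => rfl
  | cons b t ih => simp only [List.foldl_cons, List.length_cons, ih, Function.iterate_succ_apply]

-- A's mode finder equals uniqueMax on the (value, count) pairs in first-occurrence order
lemma majority_eq_uniqueMax (xs : List Int) (hne : xs ≠ []) :
    majority_element xs =
      uniqueMax ((PySem.Set.ofList xs).map (fun k => (k, (xs.count k : Int)))) := by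
  unfold majority_element
  rw [if_neg hne]
  simp only [PySem.Dict.foldl_insert_getD_add_one_eq_counter, PySem.Dict.keys_counter,
    PySem.Dict.items_counter, PySem.Dict.getD_counter]
  rcases hmax : PySem.List.max? (PySem.Set.ofList xs) (fun k => ((xs.count k : ℕ) : Int)) with _ | mm
  · exfalso
    rw [PySem.List.max?_eq_none_iff] at hmax
    rcases xs with _ | ⟨x, t⟩
    · exact hne rfl
    · have : x ∈ PySem.Set.ofList (x :: t) := (PySem.Set.mem_ofList _ _).2 (List.mem_cons_self ..)
      rw [hmax] at this
      simp at this
  · have hmm_mem : mm ∈ PySem.Set.ofList xs := PySem.List.max?_mem hmax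
    have hmm_max : ∀ y ∈ PySem.Set.ofList xs, ((xs.count y : ℕ) : Int) ≤ ((xs.count mm : ℕ) : Int) :=
      PySem.List.max?_isMax hmax
    set P := (PySem.Set.ofList xs).map (fun k => (k, (xs.count k : Int))) with hP
    have hpair_mem : (mm, (xs.count mm : Int)) ∈ P := List.mem_map_of_mem hmm_mem
    have hcnt_eq : ((xs.count mm : ℕ) : Int) = maxSnd P := by
      refine le_antisymm (maxSnd_ge hpair_mem) (maxSnd_le (Int.natCast_nonneg _) ?_)
      intro p hp
      rcases List.mem_map.1 hp with ⟨k, hk, hkeq⟩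
      rw [← hkeq]
      exact hmm_max k hk
    have hfilter : P.filter (fun kv => kv.2 == ((xs.count mm : ℕ) : Int)) = winners P := by
      unfold winners
      refine List.filter_congr ?_
      intro p _
      rw [← hcnt_eq]
      by_cases h : p.2 = ((xs.count mm : ℕ) : Int) <;> simp [h]
    unfold uniqueMax
    rw [← hfilter]
    rcases hW : P.filter (fun kv => kv.2 == ((xs.count mm : ℕ) : Int)) with _ | ⟨w, t⟩
    · rw [hW]; simp [hW]
    · cases t with
      | nil =>
        have hwin : (mm, (xs.count mm : Int)) ∈ [w] := by
          rw [← hW]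
          exact List.mem_filter.2 ⟨hpair_mem, by simp⟩
        have hww : w = (mm, (xs.count mm : Int)) := by
          rcases List.mem_singleton.1 hwin with h
          exact h.symm
        rw [hW, hww]
        simp [hW]
      | cons q t2 =>
        rw [hW]
        simp [hW, List.length_cons]

-- altScan is scanPairs of the run decomposition
lemma altScan_eq_scanPairs_aux (n : ℕ) :
    ∀ l : List Int, l.length ≤ n → ∀ (bv : Option Int) (bl ties : Int),
      altScan l bv bl ties = scanPairs (runPairs l) bv bl ties := by
  induction n with
  | zero =>
    intro l hl
    have : l = [] := List.eq_nil_of_length_eq_zero (Nat.le_zero.1 hl)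
    subst this
    intro bv bl ties
    rw [altScan, runPairs]; rfl
  | succ n ih =>
    intro l hl bv bl ties
    cases l with
    | nil => rw [altScan, runPairs]; rfl
    | cons v t =>
      rw [altScan, runPairs]
      have hrest : (t.dropWhile (fun x => x == v)).length ≤ n := by
        have := List.length_dropWhile_le (fun x => x == v) t
        simp only [List.length_cons] at hl
        omega
      simp only [scanPairs]
      split_ifs <;> exact ih _ hrest _ _ _

lemma altScan_eq_scanPairs (l : List Int) (bv : Option Int) (bl ties : Int) :
    altScan l bv bl ties = scanPairs (runPairs l) bv bl ties :=
  altScan_eq_scanPairs_aux l.length l le_rfl bv bl ties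

lemma runPairs_pos_aux (n : ℕ) :
    ∀ l : List Int, l.length ≤ n → ∀ p ∈ runPairs l, 1 ≤ p.2 := by
  induction n with
  | zero =>
    intro l hl
    have : l = [] := List.eq_nil_of_length_eq_zero (Nat.le_zero.1 hl)
    subst this
    intro p hp; simp [runPairs] at hp
  | succ n ih =>
    intro l hl p hp
    cases l with
    | nil => simp [runPairs] at hp
    | cons v t =>
      rw [runPairs] at hp
      rcases List.mem_cons.1 hp with h | h
      · subst h; simp
      · have hrest : (t.dropWhile (fun x => x == v)).length ≤ n := by
          have := List.length_dropWhile_le (fun x => x == v) t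
          simp only [List.length_cons] at hl
          omega
        exact ih _ hrest p h

lemma runPairs_pos (l : List Int) : ∀ p ∈ runPairs l, 1 ≤ p.2 :=
  runPairs_pos_aux l.length l le_rfl

-- scanPairs with the loop invariant computes uniqueMax
lemma scanPairs_inv (ps : List (Int × Int)) :
    ∀ acc : List (Int × Int),
      (∀ p ∈ acc ++ ps, 1 ≤ p.2) →
      scanPairs ps (((acc.filter (fun p => p.2 = maxSnd acc)).head?).map Prod.fst)
        (maxSnd acc) ((acc.filter (fun p => p.2 = maxSnd acc)).length : Int) =
      uniqueMax (acc ++ ps) := by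
  induction ps with
  | nil =>
    intro acc hpos
    rw [List.append_nil]
    unfold uniqueMax winners
    rcases hF : acc.filter (fun p => p.2 = maxSnd acc) with _ | ⟨p, t⟩
    · rw [hF]; simp [scanPairs]
    · cases t with
      | nil => rw [hF]; simp [scanPairs]
      | cons q t2 =>
        rw [hF]
        simp only [scanPairs, List.length_cons]
        rw [if_neg (by push_cast; omega)]
  | cons hd ps ih =>
    intro acc hpos
    obtain ⟨v, run⟩ := hd
    have hrun : 1 ≤ run := hpos (v, run) (by simp)
    have hsingle : maxSnd [(v, run)] = run := by
      show max run (maxSnd []) = run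
      have : maxSnd ([] : List (Int × Int)) = 0 := rfl
      rw [this]; omega
    have hM' : maxSnd (acc ++ [(v, run)]) = max (maxSnd acc) run := by
      rw [maxSnd_append, hsingle]
    have hpos' : ∀ p ∈ (acc ++ [(v, run)]) ++ ps, 1 ≤ p.2 := by
      intro p hp
      apply hpos
      simp only [List.mem_append, List.mem_cons] at hp ⊢
      tauto
    have happ : acc ++ (v, run) :: ps = (acc ++ [(v, run)]) ++ ps := by simp
    rw [happ]
    rw [← ih (acc ++ [(v, run)]) hpos']
    simp only [scanPairs]
    by_cases h1 : maxSnd acc < run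
    · rw [if_pos h1]
      have hFnil : acc.filter (fun p => p.2 = max (maxSnd acc) run) = [] := by
        rw [List.filter_eq_nil_iff]
        intro p hp
        have := maxSnd_ge hp
        simp only [decide_eq_true_eq]
        omega
      have hmax : max (maxSnd acc) run = run := max_eq_right h1.le
      rw [hM', List.filter_append, hFnil, List.nil_append]
      rw [hmax]
      simp [List.filter]
    · rw [if_neg h1]
      by_cases h2 : run = maxSnd acc
      · rw [if_pos h2]
        have hmax : max (maxSnd acc) run = maxSnd acc := max_eq_left (not_lt.1 h1)
        have haccne : acc ≠ [] := by
          intro hacc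
          subst hacc
          have : maxSnd ([] : List (Int × Int)) = 0 := rfl
          omega
        obtain ⟨p, hpmem, hpmax⟩ :=
          maxSnd_attained haccne (fun p hp => hpos p (by simp [List.mem_append, hp]))
        have hFne : acc.filter (fun p => p.2 = maxSnd acc) ≠ [] := by
          intro hnil
          rw [List.filter_eq_nil_iff] at hnil
          exact hnil p hpmem (by simp [hpmax])
        rw [hM', hmax, List.filter_append]
        have hsame : ((v, run) :: []).filter (fun p => p.2 = maxSnd acc) = [(v, run)] := by
          simp [List.filter, h2]
        rw [hsame]
        rw [List.head?_append]
        rcases hF : acc.filter (fun p => p.2 = maxSnd acc) with _ | ⟨w, t⟩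
        · exact absurd hF hFne
        · rw [hF]
          simp only [List.length_append, List.length_cons, List.length_nil]
          push_cast
          ring_nf
          rfl
      · rw [if_neg h2]
        have hmax : max (maxSnd acc) run = maxSnd acc := max_eq_left (not_lt.1 h1)
        rw [hM', hmax, List.filter_append]
        have hnone : ((v, run) :: []).filter (fun p => p.2 = maxSnd acc) = [] := by
          simp [List.filter, h2]
        rw [hnone, List.append_nil]

lemma dropWhile_head_false {p : Int → Bool} :
    ∀ {t : List Int} {w : Int} {d' : List Int}, t.dropWhile p = w :: d' → p w = false := by
  intro t
  induction t with
  | nil => intro w d' h; simp [List.dropWhile] at h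
  | cons x t ih =>
    intro w d' h
    by_cases hx : p x
    · rw [List.dropWhile_cons_of_pos hx] at h; exact ih h
    · rw [List.dropWhile_cons_of_neg hx] at h
      cases h
      exact Bool.of_not_eq_true hx

-- the run decomposition of a sorted list: strictly increasing values with their counts
lemma runPairs_spec_aux (n : ℕ) :
    ∀ l : List Int, l.length ≤ n → l.Pairwise (· ≤ ·) →
    ((runPairs l).map Prod.fst).Pairwise (· < ·) ∧
    (∀ k, k ∈ (runPairs l).map Prod.fst ↔ k ∈ l) ∧
    (∀ p ∈ runPairs l, p.2 = (l.count p.1 : Int)) := by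
  induction n with
  | zero =>
    intro l hl _
    have : l = [] := List.eq_nil_of_length_eq_zero (Nat.le_zero.1 hl)
    subst this
    refine ⟨by rw [runPairs]; simp, fun k => by rw [runPairs]; simp, fun p hp => by rw [runPairs] at hp; simp at hp⟩
  | succ n ih =>
    intro l hl hs
    cases l with
    | nil =>
      refine ⟨by rw [runPairs]; simp, fun k => by rw [runPairs]; simp, fun p hp => by rw [runPairs] at hp; simp at hp⟩
    | cons v t =>
      set tw := t.takeWhile (fun x => x == v) with htw
      set dw := t.dropWhile (fun x => x == v) with hdw
      have hsplit : tw ++ dw = t := List.takeWhile_append_dropWhile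
      have htwv : ∀ x ∈ tw, x = v := fun x hx => by
        have := List.mem_takeWhile_imp hx
        simpa using this
      have hvle : ∀ x ∈ t, v ≤ x := fun x hx => (List.pairwise_cons.1 hs).1 x hx
      have hdwsub : dw.Sublist t := List.dropWhile_sublist _
      have hst : t.Pairwise (· ≤ ·) := (List.pairwise_cons.1 hs).2
      have hsdw : dw.Pairwise (· ≤ ·) := List.Pairwise.sublist hdwsub hst
      have hvlt : ∀ x ∈ dw, v < x := by
        intro x hx
        rcases hdweq : dw with _ | ⟨w, d'⟩
        · rw [hdweq] at hx; simp at hx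
        · have hdw' : t.dropWhile (fun x => x == v) = w :: d' := by rw [← hdw]; exact hdweq
          have hwne : (w == v) = false := dropWhile_head_false (p := fun x => x == v) hdw'
          have hwv : w ≠ v := by simpa using hwne
          have hwmem : w ∈ t := hdwsub.mem (hdweq ▸ List.mem_cons_self ..)
          have hvw : v < w := lt_of_le_of_ne (hvle w hwmem) (Ne.symm hwv)
          rw [hdweq] at hx
          rcases List.mem_cons.1 hx with h | h
          · exact h ▸ hvw
          · have hwle : w ≤ x := (List.pairwise_cons.1 (hdweq ▸ hsdw)).1 x h
            omega
      have hvnot : v ∉ dw := fun h => absurd (hvlt v h) (lt_irrefl v)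
      have hdwlen : dw.length ≤ n := by
        have h1 : dw.length ≤ t.length := hdw ▸ List.length_dropWhile_le (fun x => x == v) t
        simp only [List.length_cons] at hl
        omega
      obtain ⟨ihpw, ihmem, ihcnt⟩ := ih dw hdwlen hsdw
      have hcountv : ((v :: t).count v : Int) = 1 + (tw.length : Int) := by
        have h1 : t.count v = tw.count v + dw.count v := by
          rw [← hsplit, List.count_append]
        have h2 : tw.count v = tw.length := by
          rw [List.count_eq_length]
          intro x hx; exact (htwv x hx).symm
        have h3 : dw.count v = 0 := List.count_eq_zero.2 hvnot
        rw [List.count_cons_self]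
        push_cast
        omega
      have hcountk : ∀ k, v < k → ((v :: t).count k : Int) = (dw.count k : Int) := by
        intro k hk
        have h1 : tw.count k = 0 := List.count_eq_zero.2 (fun hx => by
          have := htwv k hx; omega)
        rw [List.count_cons_of_ne (by omega), ← hsplit, List.count_append, h1]
        simp
      rw [runPairs]
      refine ⟨?_, ?_, ?_⟩
      · simp only [List.map_cons, List.pairwise_cons]
        refine ⟨?_, ihpw⟩
        intro k hk
        exact hvlt k ((ihmem k).1 hk)
      · intro k
        simp only [List.map_cons, List.mem_cons]
        constructor
        · rintro (h | h)
          · exact Or.inl h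
          · exact Or.inr (hdwsub.mem ((ihmem k).1 h))
        · rintro (h | h)
          · exact Or.inl h
          · rw [← hsplit] at h
            rcases List.mem_append.1 h with h | h
            · exact Or.inl (htwv k h)
            · exact Or.inr ((ihmem k).2 h)
      · intro p hp
        rcases List.mem_cons.1 hp with h | h
        · subst h
          simpa using hcountv.symm
        · have hk : p.1 ∈ dw := (ihmem p.1).1 (List.mem_map_of_mem h)
          rw [ihcnt p h, ← hcountk p.1 (hvlt p.1 hk)]

lemma runPairs_spec (l : List Int) (hs : l.Pairwise (· ≤ ·)) :
    ((runPairs l).map Prod.fst).Pairwise (· < ·) ∧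
    (∀ k, k ∈ (runPairs l).map Prod.fst ↔ k ∈ l) ∧
    (∀ p ∈ runPairs l, p.2 = (l.count p.1 : Int)) :=
  runPairs_spec_aux l.length l le_rfl hs

lemma maxSnd_perm {ps qs : List (Int × Int)} (hp : ps.Perm qs) : maxSnd ps = maxSnd qs := by
  induction hp with
  | nil => rfl
  | cons x _ ih => simp only [maxSnd, List.foldr_cons] at *; rw [ih]
  | swap x y l =>
    show max y.2 (max x.2 (maxSnd l)) = max x.2 (max y.2 (maxSnd l))
    rw [max_left_comm]
  | trans _ _ ih1 ih2 => exact ih1.trans ih2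

lemma uniqueMax_perm {ps qs : List (Int × Int)} (hp : ps.Perm qs) :
    uniqueMax ps = uniqueMax qs := by
  unfold uniqueMax winners
  have hm := maxSnd_perm hp
  rw [hm]
  have hf : (ps.filter (fun p => p.2 = maxSnd qs)).Perm (qs.filter (fun p => p.2 = maxSnd qs)) :=
    hp.filter _
  generalize hW1 : ps.filter (fun p => p.2 = maxSnd qs) = W1 at hf
  generalize hW2 : qs.filter (fun p => p.2 = maxSnd qs) = W2 at hf
  match W1, W2, hf with
  | [], W2, hf => rw [← hf.nil_eq]
  | [p], W2, hf =>
    rw [List.perm_singleton.1 hf.symm]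
  | p :: q :: t, W2, hf =>
    have hlen := hf.length_eq
    match W2, hlen with
    | x :: y :: t2, _ => rfl

lemma eq_map_fst_of_snd (g : Int → Int) :
    ∀ ps : List (Int × Int), (∀ p ∈ ps, p.2 = g p.1) →
      ps = (ps.map Prod.fst).map (fun k => (k, g k)) := by
  intro ps
  induction ps with
  | nil => intro _; rfl
  | cons p t ih =>
    intro h
    simp only [List.map_cons, List.cons.injEq]
    refine ⟨?_, ih (fun q hq => h q (List.mem_cons_of_mem _ hq))⟩
    have := h p (List.mem_cons_self ..)
    exact Prod.ext rfl this

-- B's scan equals uniqueMax on the run pairs of the sorted remainder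
lemma alt_eq_uniqueMax (xs : List Int) :
    altScan (PySem.List.sorted xs (fun x => x) false) none 0 0 =
      uniqueMax ((PySem.Set.ofList xs).map (fun k => (k, (xs.count k : Int)))) := by
  set sl := PySem.List.sorted xs (fun x => x) false with hsl
  have hp : sl.Pairwise (· ≤ ·) := PySem.List.sorted_pairwise xs (fun x => x)
  obtain ⟨hpw, hmem, hcnt⟩ := runPairs_spec sl hp
  have hperm_sl : sl.Perm xs := PySem.List.sorted_perm xs (fun x => x) false
  rw [altScan_eq_scanPairs]
  have hinv := scanPairs_inv (runPairs sl) [] (by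
    intro p hp'
    rw [List.nil_append] at hp'
    exact runPairs_pos sl p hp')
  simp only [List.filter_nil, List.head?_nil, Option.map_none, List.length_nil,
    Nat.cast_zero, List.nil_append] at hinv
  have h0 : maxSnd ([] : List (Int × Int)) = 0 := rfl
  rw [h0] at hinv
  rw [hinv]
  have hrp : runPairs sl = ((runPairs sl).map Prod.fst).map (fun k => (k, (xs.count k : Int))) := by
    apply eq_map_fst_of_snd
    intro p hp'
    rw [hcnt p hp', hperm_sl.count_eq]
  have hFnodup : ((runPairs sl).map Prod.fst).Nodup := hpw.imp ne_of_lt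
  have hFS : ((runPairs sl).map Prod.fst).Perm (PySem.Set.ofList xs) := by
    rw [List.perm_ext_iff_of_nodup hFnodup (PySem.Set.nodup_ofList xs)]
    intro k
    rw [hmem k, hperm_sl.mem_iff, PySem.Set.mem_ofList]
  rw [hrp]
  exact uniqueMax_perm (hFS.map _)

-- ===== VERDICT (by name: the statement is the Claim_ definition above) =====
theorem second_majority_element_spec : Claim_equal_second_majority_element := by
  intro arr r _
  unfold Spec_second_majority_element second_majority_element second_majority_element_alt
  have hlen : (PySem.List.pyRange 0 (arr.length : Int) 1).length = arr.length := by
    rw [PySem.List.length_pyRange_one]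
    simp
  rw [foldl_ignore, hlen, iterate_remove arr.length arr r (List.count_le_length)]
  set xs := arr.filter (fun x => !(x == r)) with hxsdef
  by_cases hxs : xs = []
  · simp [hxs]
  · rw [if_pos hxs, if_neg hxs]
    rw [majority_eq_uniqueMax xs hxs, alt_eq_uniqueMax xs]
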